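-- pv_equiv track=rewrite | github.com/lakefusionai/lakefusion-app-deploy | dbx_pipeline_artifacts/src/maven-core/Process Delete.py | apply_recency_strategy
-- ===== SOURCE A (Python) =====
-- def apply_recency_strategy(attribute, unified_records, unified_datasets, initial_value=None, initial_source=None):
--     result_value = initial_value
--     result_source = initial_source
--
--     for idx in range(len(unified_records) - 1, -1, -1):
--         if idx < len(unified_datasets) and unified_records[idx].get(attribute) is not None:
--             result_value = unified_records[idx][attribute]
--             result_source = unified_datasets[idx]
--             break
--
--     return result_value, result_source
-- ===== SOURCE B (Python) =====
-- def apply_recency_strategy(attribute, unified_records, unified_datasets, initial_value=None, initial_source=None):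
--     result = (initial_value, initial_source)
--     for record, dataset in zip(unified_records, unified_datasets):
--         value = record.get(attribute)
--         if value is not None:
--             result = (value, dataset)
--     return result
-- ===== Notes on version B (the rewrite author's own statement) =====
-- stated objective: simpler
-- what changed: B drops all index arithmetic: instead of scanning indices backwards with a break and an explicit idx < len(unified_datasets) bound check, it zips records with datasets (zip truncates to the shorter list, which is exactly A's bound check) and folds forward, letting the last qualifying pair overwrite the result.
import Mathlib
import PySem

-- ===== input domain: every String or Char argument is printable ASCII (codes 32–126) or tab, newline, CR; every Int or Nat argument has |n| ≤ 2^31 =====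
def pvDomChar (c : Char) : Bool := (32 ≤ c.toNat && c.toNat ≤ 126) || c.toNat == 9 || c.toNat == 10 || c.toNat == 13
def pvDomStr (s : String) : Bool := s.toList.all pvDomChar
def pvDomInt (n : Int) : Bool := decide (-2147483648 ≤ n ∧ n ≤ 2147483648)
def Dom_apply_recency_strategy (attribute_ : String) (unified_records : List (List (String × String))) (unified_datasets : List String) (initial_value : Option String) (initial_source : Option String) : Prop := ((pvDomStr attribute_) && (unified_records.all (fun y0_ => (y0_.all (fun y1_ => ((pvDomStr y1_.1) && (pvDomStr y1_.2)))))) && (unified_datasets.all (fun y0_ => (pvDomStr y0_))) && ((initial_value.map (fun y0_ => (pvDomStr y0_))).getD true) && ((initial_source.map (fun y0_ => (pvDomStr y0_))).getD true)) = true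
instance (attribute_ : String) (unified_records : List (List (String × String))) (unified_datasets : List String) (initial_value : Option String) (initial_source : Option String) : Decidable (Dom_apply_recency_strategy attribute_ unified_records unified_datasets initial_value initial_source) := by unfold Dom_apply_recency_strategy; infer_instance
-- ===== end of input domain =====

-- ===== PORT A =====
-- B replaces A's backward index scan with a break by a forward fold over zip(records, datasets) (objective: simpler).
-- record.get(attribute): first-match lookup, shared by both ports (same Python expression in A and B)
def pvDictGet (rec : List (String × String)) (k : String) : Option String := (PySem.Dict.mk rec).get? k

-- A's for-loop over range(len(unified_records)-1, -1, -1) with break: recursion over the index list.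
-- pyGet? … |>.getD [] : idx always comes from the range over unified_records, so the default is never used.
def pvLoopA (attribute_ : String) (unified_records : List (List (String × String))) (unified_datasets : List String) : List Int → Option String × Option String → Option String × Option String
  | [], s => s
  | idx :: rest, s =>
    if idx < (unified_datasets.length : Int) ∧ (pvDictGet ((PySem.List.pyGet? unified_records idx).getD []) attribute_).isSome then
      (pvDictGet ((PySem.List.pyGet? unified_records idx).getD []) attribute_, PySem.List.pyGet? unified_datasets idx)
    else pvLoopA attribute_ unified_records unified_datasets rest s

def apply_recency_strategy (attribute_ : String) (unified_records : List (List (String × String))) (unified_datasets : List String) (initial_value : Option String) (initial_source : Option String) : Option String × Option String :=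
  pvLoopA attribute_ unified_records unified_datasets
    (PySem.List.pyRange ((unified_records.length : Int) - 1) (-1) (-1))
    (initial_value, initial_source)

-- ===== PORT B =====
def apply_recency_strategy_alt (attribute_ : String) (unified_records : List (List (String × String))) (unified_datasets : List String) (initial_value : Option String) (initial_source : Option String) : Option String × Option String :=
  (unified_records.zip unified_datasets).foldl
    (fun res p =>
      match pvDictGet p.1 attribute_ with
      | some v => (some v, some p.2)
      | none => res)
    (initial_value, initial_source)

-- ===== PRECONDITION & SPEC =====
def Spec_apply_recency_strategy (attribute_ : String) (unified_records : List (List (String × String))) (unified_datasets : List String) (initial_value : Option String) (initial_source : Option String) (out : Option String × Option String) : Prop := out = apply_recency_strategy_alt attribute_ unified_records unified_datasets initial_value initial_source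
instance (attribute_ : String) (unified_records : List (List (String × String))) (unified_datasets : List String) (initial_value : Option String) (initial_source : Option String) (out : Option String × Option String) : Decidable (Spec_apply_recency_strategy attribute_ unified_records unified_datasets initial_value initial_source out) := by unfold Spec_apply_recency_strategy; infer_instance

-- ===== CLAIM (what is proved, stated in full; the proofs are below) =====
def Claim_equal_apply_recency_strategy : Prop := ∀ (attribute_ : String) (unified_records : List (List (String × String))) (unified_datasets : List String) (initial_value : Option String) (initial_source : Option String), Dom_apply_recency_strategy attribute_ unified_records unified_datasets initial_value initial_source → Spec_apply_recency_strategy attribute_ unified_records unified_datasets initial_value initial_source (apply_recency_strategy attribute_ unified_records unified_datasets initial_value initial_source)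

-- ===== LEMMAS AND PROOFS =====
theorem pvLoop_eq_foldl (attribute_ : String) (unified_records : List (List (String × String))) (unified_datasets : List String) (k : Nat) (hk : k ≤ unified_records.length) (s : Option String × Option String) :
    pvLoopA attribute_ unified_records unified_datasets (PySem.List.pyRange ((k : Int) - 1) (-1) (-1)) s
      = ((unified_records.zip unified_datasets).take k).foldl
          (fun res p =>
            match pvDictGet p.1 attribute_ with
            | some v => (some v, some p.2)
            | none => res) s := by
  induction k generalizing s with
  | zero =>
      rw [PySem.List.pyRange_neg_one_eq_nil (by norm_num)]
      simp [pvLoopA]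
  | succ k ih =>
      have hk' : k < unified_records.length := hk
      have hcons : PySem.List.pyRange ((k+1 : Nat) - 1 : Int) (-1) (-1)
          = ((k : Int)) :: PySem.List.pyRange ((k : Int) - 1) (-1) (-1) := by
        push_cast
        rw [PySem.List.pyRange_neg_one_cons (by omega)]
        ring_nf
      rw [hcons]
      rw [List.take_add_one]
      have hget : PySem.List.pyGet? unified_records (k : Int) = some (unified_records[k]) := by
        simp [PySem.List.pyGet?_natCast, List.getElem?_eq_getElem hk']
      by_cases hd : k < unified_datasets.length
      · have hz : k < (unified_records.zip unified_datasets).length := by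
          simp [List.length_zip]; omega
        have hzk : (unified_records.zip unified_datasets)[k]? = some (unified_records[k], unified_datasets[k]) := by
          rw [List.getElem?_eq_getElem hz]
          simp [List.getElem_zip]
        rw [hzk]
        simp only [pvLoopA, hget, Option.getD_some]
        by_cases hv : (pvDictGet (unified_records[k]) attribute_).isSome
        · rw [if_pos ⟨by exact_mod_cast hd, hv⟩]
          obtain ⟨v, hv'⟩ := Option.isSome_iff_exists.mp hv
          rw [List.foldl_append]
          simp [hv', PySem.List.pyGet?_natCast, List.getElem?_eq_getElem hd]
        · rw [if_neg (by
            intro h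
            exact hv h.2)]
          rw [List.foldl_append, ih (le_of_lt hk')]
          have hv' : pvDictGet (unified_records[k]) attribute_ = none := by
            exact Option.not_isSome_iff_eq_none.mp hv
          simp [hv']
      · have hzk : (unified_records.zip unified_datasets)[k]? = none := by
          rw [List.getElem?_eq_none]
          simp [List.length_zip]; omega
        rw [hzk]
        simp only [pvLoopA]
        rw [if_neg (by
          intro h
          exact hd (by exact_mod_cast h.1))]
        rw [ih (le_of_lt hk')]
        simp

-- ===== VERDICT (by name: the statement is the Claim_ definition above) =====
theorem apply_recency_strategy_spec : Claim_equal_apply_recency_strategy := by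
  intro attribute_ unified_records unified_datasets initial_value initial_source _
  unfold Spec_apply_recency_strategy apply_recency_strategy apply_recency_strategy_alt
  rw [pvLoop_eq_foldl attribute_ unified_records unified_datasets unified_records.length le_rfl]
  rw [List.take_of_length_le (by simp [List.length_zip])]
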